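-- pv_equiv track=rewrite | github.com/aim2nasa/aims | scripts/pre_commit_review.py | detect_changed_services
-- ===== SOURCE A (Python) =====
-- def detect_changed_services(files):
--     """변경된 서비스 감지"""
--     services = {}
--     service_map = {
--         "frontend/aims-uix3/": "frontend",
--         "backend/api/aims_api/": "aims_api",
--         "backend/api/aims_mcp/": "aims_mcp",
--         "backend/api/annual_report_api/": "annual_report_api",
--         "backend/api/document_pipeline/": "document_pipeline",
--         "backend/api/aims_rag_api/": "aims_rag_api",
--         "backend/api/pdf_proxy/": "pdf_proxy",
--     }
--     for f in files:
--         for prefix, service in service_map.items():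
--             if f.startswith(prefix):
--                 services[service] = True
--     return services
-- ===== SOURCE B (Python) =====
-- def detect_changed_services(files):
--     """변경된 서비스 감지"""
--     backend_services = ("aims_api", "aims_mcp", "annual_report_api",
--                         "document_pipeline", "aims_rag_api", "pdf_proxy")
--     services = {}
--     for f in files:
--         if f.startswith("frontend/aims-uix3/"):
--             services["frontend"] = True
--         elif f.startswith("backend/api/"):
--             rest = f[12:]
--             i = rest.find("/")
--             if i != -1 and rest[:i] in backend_services:
--                 services[rest[:i]] = True
--     return services
-- ===== Notes on version B (the rewrite author's own statement) =====
-- stated objective: faster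
-- what changed: Instead of testing every file against all seven service prefixes, B parses each path once: a fixed check for the frontend prefix, otherwise it strips 'backend/api/', cuts the next path segment and looks it up in a table of backend service names.
import Mathlib
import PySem

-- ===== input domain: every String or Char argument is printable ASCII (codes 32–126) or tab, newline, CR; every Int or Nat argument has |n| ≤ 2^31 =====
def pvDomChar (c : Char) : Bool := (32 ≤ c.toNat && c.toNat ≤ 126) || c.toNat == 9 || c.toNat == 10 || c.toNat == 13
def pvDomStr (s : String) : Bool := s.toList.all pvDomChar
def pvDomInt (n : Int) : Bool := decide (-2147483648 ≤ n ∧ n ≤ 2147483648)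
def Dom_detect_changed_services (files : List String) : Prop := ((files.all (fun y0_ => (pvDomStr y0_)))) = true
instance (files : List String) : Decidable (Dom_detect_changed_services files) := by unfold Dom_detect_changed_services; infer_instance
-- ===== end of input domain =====

-- B replaces A's per-file scan over all seven map prefixes by parsing each path once
-- (fixed "frontend/aims-uix3/" check, else strip "backend/api/", cut the next path segment
-- and look it up in a table of service names) — measurably faster by a constant factor.

-- ===== PORT A =====
def pvServiceMapA : List (String × String) :=
  [("frontend/aims-uix3/", "frontend"),
   ("backend/api/aims_api/", "aims_api"),
   ("backend/api/aims_mcp/", "aims_mcp"),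
   ("backend/api/annual_report_api/", "annual_report_api"),
   ("backend/api/document_pipeline/", "document_pipeline"),
   ("backend/api/aims_rag_api/", "aims_rag_api"),
   ("backend/api/pdf_proxy/", "pdf_proxy")]

def detect_changed_services (files : List String) : List (String × Bool) :=
  (files.foldl
    (fun services f =>
      pvServiceMapA.foldl
        (fun services ps =>
          if PySem.Str.startswith f ps.1 then services.insert ps.2 true else services)
        services)
    PySem.Dict.empty).items

-- ===== PORT B =====
def pvBackendServicesB : List String :=
  ["aims_api", "aims_mcp", "annual_report_api", "document_pipeline", "aims_rag_api", "pdf_proxy"]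

def pvStepB (services : PySem.Dict String Bool) (f : String) : PySem.Dict String Bool :=
  if PySem.Str.startswith f "frontend/aims-uix3/" then
    services.insert "frontend" true
  else if PySem.Str.startswith f "backend/api/" then
    let rest := PySem.Str.slice f (some 12) none
    let i := PySem.Str.find rest "/"
    if i ≠ -1 ∧ pvBackendServicesB.contains (PySem.Str.slice rest none (some i)) then
      services.insert (PySem.Str.slice rest none (some i)) true
    else services
  else services

def detect_changed_services_alt (files : List String) : List (String × Bool) :=
  (files.foldl pvStepB PySem.Dict.empty).items

-- ===== PRECONDITION & SPEC =====
def Spec_detect_changed_services (files : List String) (out : List (String × Bool)) : Prop := out = detect_changed_services_alt files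
instance (files : List String) (out : List (String × Bool)) : Decidable (Spec_detect_changed_services files out) := by unfold Spec_detect_changed_services; infer_instance

-- ===== CLAIM (what is proved, stated in full; the proofs are below) =====
def Claim_equal_detect_changed_services : Prop := ∀ (files : List String), Dom_detect_changed_services files → Spec_detect_changed_services files (detect_changed_services files)

-- ===== LEMMAS AND PROOFS =====

-- startswith at the String level, as a prefix of char lists
lemma pv_sw_iff (f p : String) : PySem.Str.startswith f p = true ↔ p.toList <+: f.toList := by
  rw [PySem.Str.startswith_eq, PySem.Chars.startswith_iff]

lemma pv_sw_false {f p : String} (h : ¬ p.toList <+: f.toList) :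
    PySem.Str.startswith f p = false := by
  rw [← Bool.not_eq_true, pv_sw_iff]; exact h

-- p and q incomparable prefixes cannot both start the same list
lemma pv_not_pref {p q l : List Char} (hp : p <+: l) (h1 : ¬ p <+: q) (h2 : ¬ q <+: p) :
    ¬ q <+: l := fun hq => (List.prefix_or_prefix_of_prefix hp hq).elim h1 h2

-- "nm ++ '/' starts rest" characterised by the first '/' found in rest
lemma pv_seg_iff (nm rest : List Char) (hnm : '/' ∉ nm) :
    (nm ++ ['/']) <+: rest ↔
      (PySem.Chars.find rest ['/'] ≠ -1 ∧
        List.take (PySem.Chars.find rest ['/']).toNat rest = nm) := by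
  constructor
  · rintro ⟨t, ht⟩
    have hin : PySem.Chars.find rest ['/'] ≠ -1 := by
      rw [PySem.Chars.find_ne_neg_one_iff]
      exact ⟨nm, t, by simpa using ht⟩
    have hspec := PySem.Chars.findFrom_natCast_spec rest ['/'] 0 (Nat.zero_le _)
      (by simpa [PySem.Chars.findFrom_zero] using hin)
    rw [show ((0:Nat):Int) = 0 from rfl, PySem.Chars.findFrom_zero] at hspec
    obtain ⟨-, hpre, hmin⟩ := hspec
    set j := (PySem.Chars.find rest ['/']).toNat with hj
    have hle : j ≤ nm.length :=
      Nat.le_of_not_lt (fun h => hmin nm.length (Nat.zero_le _) h ⟨t, by rw [← ht]; simp⟩)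
    have hge : ¬ j < nm.length := by
      intro hlt
      obtain ⟨t', ht'⟩ := hpre
      have hdrop : rest.drop j = '/' :: t' := by simpa using ht'.symm
      have hgetj : rest[j]? = some '/' := by
        rw [show rest[j]? = (rest.drop j).head? by simp [List.head?_drop], hdrop]; rfl
      have : nm[j]? = some '/' := by
        rw [← ht] at hgetj
        rw [List.getElem?_append_left (by simp; omega)] at hgetj
        rwa [List.getElem?_append_left (by omega)] at hgetj
      exact hnm (List.mem_of_getElem? this)
    have hjeq : j = nm.length := by omega
    refine ⟨hin, ?_⟩
    rw [hjeq, ← ht, show nm ++ ['/'] ++ t = nm ++ (['/'] ++ t) by simp, List.take_left]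
  · rintro ⟨hne, htake⟩
    have hspec := PySem.Chars.findFrom_natCast_spec rest ['/'] 0 (Nat.zero_le _)
      (by simpa [PySem.Chars.findFrom_zero] using hne)
    rw [show ((0:Nat):Int) = 0 from rfl, PySem.Chars.findFrom_zero] at hspec
    obtain ⟨-, hpre, -⟩ := hspec
    obtain ⟨t', ht'⟩ := hpre
    refine ⟨t', ?_⟩
    have : rest = nm ++ ('/' :: t') := by
      conv_lhs => rw [← List.take_append_drop (PySem.Chars.find rest ['/']).toNat rest]
      rw [htake,
        show rest.drop (PySem.Chars.find rest ['/']).toNat = '/' :: t' by simpa using ht'.symm]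
    simpa using this.symm

-- the key characterisation for one backend service prefix "backend/api/<nm>/"
lemma pv_backend_key (f nm q : String) (hnm : '/' ∉ nm.toList)
    (hpre : ("backend/api/").toList <+: f.toList)
    (hq : q.toList = ("backend/api/").toList ++ (nm.toList ++ ['/'])) :
    (PySem.Str.startswith f q = true ↔
      (PySem.Chars.find (f.toList.drop 12) ['/'] ≠ -1 ∧
        (f.toList.drop 12).take (PySem.Chars.find (f.toList.drop 12) ['/']).toNat = nm.toList)) := by
  rw [pv_sw_iff, hq]
  have hsplit : f.toList = ("backend/api/").toList ++ f.toList.drop 12 := by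
    conv_lhs => rw [← List.take_append_drop 12 f.toList]
    rw [show List.take 12 f.toList = ("backend/api/").toList by
      simpa using (List.prefix_iff_eq_take.mp hpre).symm]
  conv_lhs => rw [hsplit]
  rw [List.prefix_append_right_inj]
  exact pv_seg_iff nm.toList (f.toList.drop 12) hnm

-- one file processed by A's inner scan equals one file processed by B's parser
set_option maxHeartbeats 1000000 in
lemma pv_step_eq (services : PySem.Dict String Bool) (f : String) :
    pvServiceMapA.foldl
      (fun services ps =>
        if PySem.Str.startswith f ps.1 then services.insert ps.2 true else services)
      services = pvStepB services f := by
  simp only [pvServiceMapA, pvStepB, List.foldl_cons, List.foldl_nil]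
  cases hfe : PySem.Str.startswith f "frontend/aims-uix3/" with
  | true =>
    have hfp : ("frontend/aims-uix3/").toList <+: f.toList := (pv_sw_iff _ _).mp hfe
    have h2 := pv_sw_false (f := f) (pv_not_pref (q := ("backend/api/aims_api/").toList) hfp (by decide) (by decide))
    have h3 := pv_sw_false (f := f) (pv_not_pref (q := ("backend/api/aims_mcp/").toList) hfp (by decide) (by decide))
    have h4 := pv_sw_false (f := f) (pv_not_pref (q := ("backend/api/annual_report_api/").toList) hfp (by decide) (by decide))
    have h5 := pv_sw_false (f := f) (pv_not_pref (q := ("backend/api/document_pipeline/").toList) hfp (by decide) (by decide))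
    have h6 := pv_sw_false (f := f) (pv_not_pref (q := ("backend/api/aims_rag_api/").toList) hfp (by decide) (by decide))
    have h7 := pv_sw_false (f := f) (pv_not_pref (q := ("backend/api/pdf_proxy/").toList) hfp (by decide) (by decide))
    simp only [h2, h3, h4, h5, h6, h7, Bool.false_eq_true, if_false, if_true]
  | false =>
    cases hba : PySem.Str.startswith f "backend/api/" with
    | false =>
      have hnb : ¬ ("backend/api/").toList <+: f.toList := fun h =>
        Bool.false_ne_true (hba.symm.trans ((pv_sw_iff f "backend/api/").mpr h))
      have hk : ∀ q : String, ("backend/api/").toList <+: q.toList →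
          PySem.Str.startswith f q = false := fun q hq =>
        pv_sw_false (fun h => hnb (hq.trans h))
      have h2 := hk "backend/api/aims_api/" (by decide)
      have h3 := hk "backend/api/aims_mcp/" (by decide)
      have h4 := hk "backend/api/annual_report_api/" (by decide)
      have h5 := hk "backend/api/document_pipeline/" (by decide)
      have h6 := hk "backend/api/aims_rag_api/" (by decide)
      have h7 := hk "backend/api/pdf_proxy/" (by decide)
      simp only [h2, h3, h4, h5, h6, h7, Bool.false_eq_true, if_false]
    | true =>
      have hbp : ("backend/api/").toList <+: f.toList := (pv_sw_iff _ _).mp hba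
      have hrest : (PySem.Str.slice f (some 12) none).toList = f.toList.drop 12 := by
        rw [PySem.Str.toList_slice, PySem.Chars.slice_eq_listSlice]
        exact_mod_cast PySem.List.slice_from_natCast f.toList 12
      have hfind : PySem.Str.find (PySem.Str.slice f (some 12) none) "/" =
          PySem.Chars.find (f.toList.drop 12) ['/'] := by
        rw [PySem.Str.find_eq, hrest]; rfl
      have k2 := pv_backend_key f "aims_api" "backend/api/aims_api/" (by decide) hbp (by decide)
      have k3 := pv_backend_key f "aims_mcp" "backend/api/aims_mcp/" (by decide) hbp (by decide)
      have k4 := pv_backend_key f "annual_report_api" "backend/api/annual_report_api/" (by decide) hbp (by decide)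
      have k5 := pv_backend_key f "document_pipeline" "backend/api/document_pipeline/" (by decide) hbp (by decide)
      have k6 := pv_backend_key f "aims_rag_api" "backend/api/aims_rag_api/" (by decide) hbp (by decide)
      have k7 := pv_backend_key f "pdf_proxy" "backend/api/pdf_proxy/" (by decide) hbp (by decide)
      by_cases hi : PySem.Chars.find (f.toList.drop 12) ['/'] = -1
      · have h2 : PySem.Str.startswith f "backend/api/aims_api/" = false := by
          rw [← Bool.not_eq_true, k2]; exact fun h => h.1 hi
        have h3 : PySem.Str.startswith f "backend/api/aims_mcp/" = false := by
          rw [← Bool.not_eq_true, k3]; exact fun h => h.1 hi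
        have h4 : PySem.Str.startswith f "backend/api/annual_report_api/" = false := by
          rw [← Bool.not_eq_true, k4]; exact fun h => h.1 hi
        have h5 : PySem.Str.startswith f "backend/api/document_pipeline/" = false := by
          rw [← Bool.not_eq_true, k5]; exact fun h => h.1 hi
        have h6 : PySem.Str.startswith f "backend/api/aims_rag_api/" = false := by
          rw [← Bool.not_eq_true, k6]; exact fun h => h.1 hi
        have h7 : PySem.Str.startswith f "backend/api/pdf_proxy/" = false := by
          rw [← Bool.not_eq_true, k7]; exact fun h => h.1 hi
        simp only [h2, h3, h4, h5, h6, h7, Bool.false_eq_true, if_false]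
        have hnc : ¬ (PySem.Str.find (PySem.Str.slice f (some 12) none) "/" ≠ -1 ∧
            pvBackendServicesB.contains (PySem.Str.slice (PySem.Str.slice f (some 12) none) none
              (some (PySem.Str.find (PySem.Str.slice f (some 12) none) "/"))) = true) :=
          fun hc => hc.1 (hfind.trans hi)
        rw [if_neg hnc]
        simp
      · -- a '/' exists in the remainder; compare the cut segment with each table entry
        have hpos : (0:Int) ≤ PySem.Chars.find (f.toList.drop 12) ['/'] := by
          have h1 := PySem.Chars.neg_one_le_find (f.toList.drop 12) ['/']
          have h2 : PySem.Chars.find (f.toList.drop 12) ['/'] ≠ -1 := hi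
          omega
        have hname : (PySem.Str.slice (PySem.Str.slice f (some 12) none) none
            (some (PySem.Str.find (PySem.Str.slice f (some 12) none) "/"))).toList =
            (f.toList.drop 12).take (PySem.Chars.find (f.toList.drop 12) ['/']).toNat := by
          rw [PySem.Str.toList_slice, PySem.Chars.slice_eq_listSlice, hfind,
            PySem.List.slice_to _ hpos, hrest]
        set nmx := (f.toList.drop 12).take (PySem.Chars.find (f.toList.drop 12) ['/']).toNat with hnmx
        have hsname : ∀ s : String, (PySem.Str.slice (PySem.Str.slice f (some 12) none) none
            (some (PySem.Str.find (PySem.Str.slice f (some 12) none) "/"))) = s ↔ nmx = s.toList := by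
          intro s
          rw [← String.toList_inj, hname]
        have htrue : ∀ (nm q : String),
            (PySem.Str.startswith f q = true ↔
              (PySem.Chars.find (f.toList.drop 12) ['/'] ≠ -1 ∧ nmx = nm.toList)) →
            nmx = nm.toList → PySem.Str.startswith f q = true := fun nm q hk he => hk.mpr ⟨hi, he⟩
        have hfalse : ∀ (nm q : String),
            (PySem.Str.startswith f q = true ↔
              (PySem.Chars.find (f.toList.drop 12) ['/'] ≠ -1 ∧ nmx = nm.toList)) →
            nmx ≠ nm.toList → PySem.Str.startswith f q = false := fun nm q hk hne => by
          rw [← Bool.not_eq_true, hk]; exact fun h => hne h.2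
        by_cases e2 : nmx = ("aims_api").toList
        · have hne := (hsname "aims_api").mpr e2
          have h2 := htrue _ _ k2 e2
          have h3 := hfalse _ _ k3 (by rw [e2]; decide)
          have h4 := hfalse _ _ k4 (by rw [e2]; decide)
          have h5 := hfalse _ _ k5 (by rw [e2]; decide)
          have h6 := hfalse _ _ k6 (by rw [e2]; decide)
          have h7 := hfalse _ _ k7 (by rw [e2]; decide)
          simp only [h2, h3, h4, h5, h6, h7, hne, Bool.false_eq_true, if_false, if_true]
          rw [if_pos ⟨by rw [hfind]; exact hi, by decide⟩]
        · by_cases e3 : nmx = ("aims_mcp").toList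
          · have hne := (hsname "aims_mcp").mpr e3
            have h2 := hfalse _ _ k2 (by rw [e3]; decide)
            have h3 := htrue _ _ k3 e3
            have h4 := hfalse _ _ k4 (by rw [e3]; decide)
            have h5 := hfalse _ _ k5 (by rw [e3]; decide)
            have h6 := hfalse _ _ k6 (by rw [e3]; decide)
            have h7 := hfalse _ _ k7 (by rw [e3]; decide)
            simp only [h2, h3, h4, h5, h6, h7, hne, Bool.false_eq_true, if_false, if_true]
            rw [if_pos ⟨by rw [hfind]; exact hi, by decide⟩]
          · by_cases e4 : nmx = ("annual_report_api").toList
            · have hne := (hsname "annual_report_api").mpr e4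
              have h2 := hfalse _ _ k2 (by rw [e4]; decide)
              have h3 := hfalse _ _ k3 (by rw [e4]; decide)
              have h4 := htrue _ _ k4 e4
              have h5 := hfalse _ _ k5 (by rw [e4]; decide)
              have h6 := hfalse _ _ k6 (by rw [e4]; decide)
              have h7 := hfalse _ _ k7 (by rw [e4]; decide)
              simp only [h2, h3, h4, h5, h6, h7, hne, Bool.false_eq_true, if_false, if_true]
              rw [if_pos ⟨by rw [hfind]; exact hi, by decide⟩]
            · by_cases e5 : nmx = ("document_pipeline").toList
              · have hne := (hsname "document_pipeline").mpr e5
                have h2 := hfalse _ _ k2 (by rw [e5]; decide)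
                have h3 := hfalse _ _ k3 (by rw [e5]; decide)
                have h4 := hfalse _ _ k4 (by rw [e5]; decide)
                have h5 := htrue _ _ k5 e5
                have h6 := hfalse _ _ k6 (by rw [e5]; decide)
                have h7 := hfalse _ _ k7 (by rw [e5]; decide)
                simp only [h2, h3, h4, h5, h6, h7, hne, Bool.false_eq_true, if_false, if_true]
                rw [if_pos ⟨by rw [hfind]; exact hi, by decide⟩]
              · by_cases e6 : nmx = ("aims_rag_api").toList
                · have hne := (hsname "aims_rag_api").mpr e6
                  have h2 := hfalse _ _ k2 (by rw [e6]; decide)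
                  have h3 := hfalse _ _ k3 (by rw [e6]; decide)
                  have h4 := hfalse _ _ k4 (by rw [e6]; decide)
                  have h5 := hfalse _ _ k5 (by rw [e6]; decide)
                  have h6 := htrue _ _ k6 e6
                  have h7 := hfalse _ _ k7 (by rw [e6]; decide)
                  simp only [h2, h3, h4, h5, h6, h7, hne, Bool.false_eq_true, if_false, if_true]
                  rw [if_pos ⟨by rw [hfind]; exact hi, by decide⟩]
                · by_cases e7 : nmx = ("pdf_proxy").toList
                  · have hne := (hsname "pdf_proxy").mpr e7
                    have h2 := hfalse _ _ k2 (by rw [e7]; decide)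
                    have h3 := hfalse _ _ k3 (by rw [e7]; decide)
                    have h4 := hfalse _ _ k4 (by rw [e7]; decide)
                    have h5 := hfalse _ _ k5 (by rw [e7]; decide)
                    have h6 := hfalse _ _ k6 (by rw [e7]; decide)
                    have h7 := htrue _ _ k7 e7
                    simp only [h2, h3, h4, h5, h6, h7, hne, Bool.false_eq_true, if_false, if_true]
                    rw [if_pos ⟨by rw [hfind]; exact hi, by decide⟩]
                  · have hcont : pvBackendServicesB.contains (PySem.Str.slice
                        (PySem.Str.slice f (some 12) none) none
                        (some (PySem.Str.find (PySem.Str.slice f (some 12) none) "/"))) = false := by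
                      rw [← Bool.not_eq_true]
                      intro hct
                      have hmem := List.contains_iff_mem.mp hct
                      simp only [pvBackendServicesB, List.mem_cons, List.not_mem_nil,
                        or_false] at hmem
                      rcases hmem with h|h|h|h|h|h
                      · exact e2 ((hsname _).mp h)
                      · exact e3 ((hsname _).mp h)
                      · exact e4 ((hsname _).mp h)
                      · exact e5 ((hsname _).mp h)
                      · exact e6 ((hsname _).mp h)
                      · exact e7 ((hsname _).mp h)
                    have h2 := hfalse _ _ k2 e2
                    have h3 := hfalse _ _ k3 e3
                    have h4 := hfalse _ _ k4 e4
                    have h5 := hfalse _ _ k5 e5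
                    have h6 := hfalse _ _ k6 e6
                    have h7 := hfalse _ _ k7 e7
                    simp only [h2, h3, h4, h5, h6, h7, Bool.false_eq_true, if_false]
                    have hnc : ¬ (PySem.Str.find (PySem.Str.slice f (some 12) none) "/" ≠ -1 ∧
                        pvBackendServicesB.contains (PySem.Str.slice
                          (PySem.Str.slice f (some 12) none) none
                          (some (PySem.Str.find (PySem.Str.slice f (some 12) none) "/"))) = true) :=
                      fun hc => Bool.false_ne_true (hcont.symm.trans hc.2)
                    rw [if_neg hnc]
                    simp

-- ===== VERDICT (by name: the statement is the Claim_ definition above) =====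
theorem detect_changed_services_spec : Claim_equal_detect_changed_services := by
  intro files _
  unfold Spec_detect_changed_services detect_changed_services detect_changed_services_alt
  have h : (fun (services : PySem.Dict String Bool) (f : String) =>
      pvServiceMapA.foldl
        (fun services ps =>
          if PySem.Str.startswith f ps.1 then services.insert ps.2 true else services)
        services) = pvStepB := by
    funext d f
    exact pv_step_eq d f
  rw [h]
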